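-- pv_equiv track=rewrite | github.com/boostcampaitech7/level4-cv-finalproject-hackathon-cv-15-lv3 | split_process/main/main_server.py | distribute_files
-- ===== SOURCE A (Python) =====
-- import math
-- from typing import List, Dict
--
-- def distribute_files(files: List[str], num_servers: int) -> Dict[int, List[str]]:
--     """파일들을 서버 수에 맞게 균등하게 분배합니다."""
--     files_per_server = math.ceil(len(files) / num_servers)
--     distribution = {}
--
--     for i in range(num_servers):
--         start_idx = i * files_per_server
--         end_idx = min((i + 1) * files_per_server, len(files))
--         distribution[i] = files[start_idx:end_idx]
--
--     return distribution
-- ===== SOURCE B (Python) =====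
-- import math
--
--
-- def distribute_files(files, num_servers):
--     """Scatter pass: each file goes to server idx // files_per_server."""
--     files_per_server = math.ceil(len(files) / num_servers)
--     distribution = {i: [] for i in range(num_servers)}
--     for idx, f in enumerate(files):
--         distribution[idx // files_per_server].append(f)
--     return distribution
-- ===== Notes on version B (the rewrite author's own statement) =====
-- stated objective: alternative
-- what changed: Instead of gathering one contiguous slice per server (loop over servers, slicing the file list), B pre-initializes every server's empty list and makes a single scatter pass over the files, appending each file to server idx // files_per_server.
-- outside the precondition, e.g. on distribute_files(['x', 'y'], -2): A returns {}, B raises KeyError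
import Mathlib
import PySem

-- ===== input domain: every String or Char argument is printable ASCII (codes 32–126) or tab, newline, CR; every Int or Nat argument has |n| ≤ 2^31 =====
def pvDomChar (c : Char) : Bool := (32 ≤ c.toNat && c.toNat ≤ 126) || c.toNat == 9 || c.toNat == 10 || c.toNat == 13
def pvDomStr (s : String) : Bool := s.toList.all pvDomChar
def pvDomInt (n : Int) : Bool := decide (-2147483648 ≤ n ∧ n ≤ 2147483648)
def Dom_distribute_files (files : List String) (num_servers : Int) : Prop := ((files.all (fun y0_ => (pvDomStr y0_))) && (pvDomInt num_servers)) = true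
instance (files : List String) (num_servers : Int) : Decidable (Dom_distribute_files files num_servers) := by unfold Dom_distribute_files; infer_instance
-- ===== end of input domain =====

-- B replaces A's per-server slice gathering by a single scatter pass over the files
-- (append each file to server idx // files_per_server); alternative decomposition, same cost.


-- ===== PORT A =====
-- math.ceil(len(files)/num_servers) ported as -((-len) // num_servers): exact for these
-- magnitudes (the float division is exact well beyond 2^31).
def distribute_files (files : List String) (num_servers : Int) : List (Int × List String) :=
  let fps : Int := -(PySem.Int.floordiv (-(files.length : Int)) num_servers)
  ((PySem.List.pyRange 0 num_servers 1).foldl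
    (fun d i =>
      let start : Int := i * fps
      let stop : Int := min ((i + 1) * fps) (files.length : Int)
      d.insert i (PySem.List.slice files (some start) (some stop)))
    (PySem.Dict.empty : PySem.Dict Int (List String))).items

-- ===== PORT B =====
-- distribution[idx // fps].append(f): Python raises KeyError on a missing key; Dict.modify
-- with default [] is exact whenever the key is already present, which holds on all of Pre_.
def distribute_files_alt (files : List String) (num_servers : Int) : List (Int × List String) :=
  let fps : Int := -(PySem.Int.floordiv (-(files.length : Int)) num_servers)
  let d0 : PySem.Dict Int (List String) :=
    (PySem.List.pyRange 0 num_servers 1).foldl (fun d i => d.insert i []) PySem.Dict.empty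
  ((PySem.List.enumerate files 0).foldl
    (fun d p => d.modify (PySem.Int.floordiv p.1 fps) [] (fun v => v ++ [p.2])) d0).items

-- ===== PRECONDITION & SPEC =====
-- Pre_ excludes num_servers ≤ 0: at 0 A raises ZeroDivisionError, and for negative counts A
-- returns an empty dict (an accident of range() over a negative bound) while B's scatter
-- loop raises KeyError on any nonempty file list there.
def Pre_distribute_files (files : List String) (num_servers : Int) : Prop :=
  1 ≤ num_servers
instance (files : List String) (num_servers : Int) : Decidable (Pre_distribute_files files num_servers) := by unfold Pre_distribute_files; infer_instance
def pvWitness_distribute_files : List String × Int := (["a", "b", "c"], 2)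

def Spec_distribute_files (files : List String) (num_servers : Int) (out : List (Int × List String)) : Prop := out = distribute_files_alt files num_servers
instance (files : List String) (num_servers : Int) (out : List (Int × List String)) : Decidable (Spec_distribute_files files num_servers out) := by unfold Spec_distribute_files; infer_instance

-- ===== CLAIM (what is proved, stated in full; the proofs are below) =====
def Claim_equal_distribute_files : Prop := ∀ (files : List String) (num_servers : Int), Dom_distribute_files files num_servers → Pre_distribute_files files num_servers → Spec_distribute_files files num_servers (distribute_files files num_servers)

-- ===== LEMMAS AND PROOFS =====

-- fps = ceil(N/ns): it is nonnegative and ns·fps covers all N file indices.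
theorem pv_ceil_facts (N : Nat) (ns : Int) (h : 1 ≤ ns) :
    0 ≤ -(PySem.Int.floordiv (-(N : Int)) ns) ∧
      (N : Int) ≤ -(PySem.Int.floordiv (-(N : Int)) ns) * ns := by
  have h2 := (PySem.Int.neg_floordiv_neg_eq_iff_of_pos
      (a := (N : Int)) (b := ns) (q := -(PySem.Int.floordiv (-(N : Int)) ns)) (by omega)).mp rfl
  refine ⟨?_, h2.2⟩
  nlinarith [h2.2, Int.natCast_nonneg N]

-- A's insert loop over the fresh, distinct keys 0..ns-1 is a map.
theorem pv_A_items (files : List String) (ns : Int) :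
    distribute_files files ns
      = (PySem.List.pyRange 0 ns 1).map (fun i =>
          (i, PySem.List.slice files
            (some (i * -(PySem.Int.floordiv (-(files.length : Int)) ns)))
            (some (min ((i + 1) * -(PySem.Int.floordiv (-(files.length : Int)) ns))
              (files.length : Int))))) := by
  unfold distribute_files
  rw [PySem.Dict.items_foldl_insert_fresh (PySem.List.pyRange 0 ns 1) (fun i => i) _ _
    (by intro a _; simp [PySem.Dict.contains_empty]) (by simpa using PySem.List.nodup_pyRange_one 0 ns)]
  simp [PySem.Dict.empty]

-- B's pre-initialisation loop is a map to empty lists.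
theorem pv_d0_items (ns : Int) :
    ((PySem.List.pyRange 0 ns 1).foldl (fun d i => d.insert i [])
        (PySem.Dict.empty : PySem.Dict Int (List String))).items
      = (PySem.List.pyRange 0 ns 1).map (fun i => (i, ([] : List String))) := by
  rw [PySem.Dict.items_foldl_insert_fresh (PySem.List.pyRange 0 ns 1) (fun i => i) _ _
    (by intro a _; simp [PySem.Dict.contains_empty]) (by simpa using PySem.List.nodup_pyRange_one 0 ns)]
  simp [PySem.Dict.empty]

-- B's scatter loop, provided every computed key idx // fps hits a pre-initialised server:
-- server i ends up with the files whose index k satisfies k // fps = i, in order.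
theorem pv_B_items (files : List String) (ns : Int)
    (hmem : ∀ p ∈ PySem.List.enumerate files 0,
      PySem.Int.floordiv p.1 (-(PySem.Int.floordiv (-(files.length : Int)) ns))
        ∈ PySem.List.pyRange 0 ns 1) :
    distribute_files_alt files ns
      = (PySem.List.pyRange 0 ns 1).map (fun i =>
          (i, ((PySem.List.enumerate files 0).filter
            (fun p => PySem.Int.floordiv p.1
              (-(PySem.Int.floordiv (-(files.length : Int)) ns)) == i)).map (fun p => p.2))) := by
  unfold distribute_files_alt
  set fps : Int := -(PySem.Int.floordiv (-(files.length : Int)) ns) with hfps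
  set d0 : PySem.Dict Int (List String) :=
    (PySem.List.pyRange 0 ns 1).foldl (fun d i => d.insert i []) PySem.Dict.empty with hd0
  have hd0items : d0.items = (PySem.List.pyRange 0 ns 1).map (fun i => (i, ([] : List String))) :=
    pv_d0_items ns
  have hd0keys : d0.keys = PySem.List.pyRange 0 ns 1 := by
    show d0.items.map Prod.fst = _
    rw [hd0items]; simp [Function.comp_def]
  have hnodup0 : d0.keys.Nodup := by rw [hd0keys]; exact PySem.List.nodup_pyRange_one 0 ns
  set dB := (PySem.List.enumerate files 0).foldl
    (fun d p => d.modify (PySem.Int.floordiv p.1 fps) [] (fun v => v ++ [p.2])) d0 with hdB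
  have hkeys : dB.keys = PySem.List.pyRange 0 ns 1 := by
    rw [hdB, PySem.Dict.keys_foldl_modify_key (PySem.List.enumerate files 0)
      (fun p => PySem.Int.floordiv p.1 fps) [] (fun _ p => fun v => v ++ [p.2]) d0,
      PySem.Set.update_eq_append_filter, hd0keys]
    have : (List.filter (fun y => !PySem.Set.contains (PySem.List.pyRange 0 ns 1) y)
        (PySem.Set.ofList ((PySem.List.enumerate files 0).map
          (fun p => PySem.Int.floordiv p.1 fps)))) = [] := by
      apply List.filter_eq_nil_iff.mpr
      intro y hy
      have hy' : y ∈ (PySem.List.enumerate files 0).map (fun p => PySem.Int.floordiv p.1 fps) := by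
        simpa [PySem.Set.mem_ofList] using hy
      rcases List.mem_map.mp hy' with ⟨p, hp, rfl⟩
      simp only [Bool.not_eq_true', Bool.not_eq_false]
      exact (PySem.Set.contains_iff _ _).mpr (hmem p hp)
    rw [this, List.append_nil]
  have hnodup : dB.keys.Nodup := by rw [hkeys]; exact PySem.List.nodup_pyRange_one 0 ns
  rw [PySem.Dict.items_eq_map_keys dB hnodup [], hkeys]
  apply List.map_congr_left
  intro i hi
  have hgetD : dB.getD i [] = ((PySem.List.enumerate files 0).filter
      (fun p => PySem.Int.floordiv p.1 fps == i)).map (fun p => p.2) := by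
    have hfold : dB = (((PySem.List.enumerate files 0).map
        (fun p => (PySem.Int.floordiv p.1 fps, p.2))).foldl
        (fun d q => d.modify q.1 [] (fun v => v ++ [q.2])) d0) := by
      rw [hdB, List.foldl_map]
    rw [hfold, PySem.Dict.getD_foldl_modify_append]
    have hd0getD : d0.getD i [] = [] := by
      apply PySem.Dict.getD_of_mem_items d0 _ hnodup0
      rw [hd0items]
      exact List.mem_map.mpr ⟨i, by simpa [PySem.List.mem_pyRange_one] using hi, rfl⟩
    rw [hd0getD, List.nil_append, List.filter_map, List.map_map]
    rfl
  rw [hgetD]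

-- The files whose index k has k // F = j are exactly the contiguous chunk
-- files[j*F : j*F+F], in order.
theorem pv_chunk_eq {α : Type} (l : List α) (F j : Nat) (hF : 0 < F) :
    ((PySem.List.enumerate l 0).filter
        (fun p => PySem.Int.floordiv p.1 (F : Int) == (j : Int))).map (fun p => p.2)
      = (l.drop (j * F)).take F := by
  by_cases hjF : l.length ≤ j * F
  · have hdrop : l.drop (j * F) = [] := List.drop_eq_nil_iff.mpr hjF
    rw [hdrop]
    simp only [List.take_nil]
    rw [List.filter_eq_nil_iff.mpr, List.map_nil]
    intro p hp
    rcases (PySem.List.mem_enumerate_iff l 0 p).mp hp with ⟨k, hk, rfl⟩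
    have hcast : (0 : Int) + (k : Nat) = ((k : Nat) : Int) := by ring
    simp only [hcast, PySem.Int.floordiv_natCast, beq_iff_eq, Nat.cast_inj]
    have hklt : k < j * F := lt_of_lt_of_le hk hjF
    have : k / F < j := (Nat.div_lt_iff_lt_mul hF).mpr hklt
    omega
  · rw [not_le] at hjF
    have hdecomp : l = l.take (j * F) ++ ((l.drop (j * F)).take F ++ (l.drop (j * F)).drop F) := by
      rw [List.take_append_drop, List.take_append_drop]
    set A := l.take (j * F) with hA
    set B := (l.drop (j * F)).take F with hB
    set C := (l.drop (j * F)).drop F with hC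
    have lenA : A.length = j * F := by
      rw [hA, List.length_take]; omega
    have lenB : B.length = min F (l.length - j * F) := by
      rw [hB, List.length_take, List.length_drop]
    conv_lhs => rw [hdecomp]
    rw [PySem.List.enumerate_append, PySem.List.enumerate_append, List.filter_append,
      List.filter_append, List.map_append, List.map_append]
    have hfA : (PySem.List.enumerate A 0).filter
        (fun p => PySem.Int.floordiv p.1 (F : Int) == (j : Int)) = [] := by
      apply List.filter_eq_nil_iff.mpr
      intro p hp
      rcases (PySem.List.mem_enumerate_iff A 0 p).mp hp with ⟨k, hk, rfl⟩
      have hcast : (0 : Int) + (k : Nat) = ((k : Nat) : Int) := by ring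
      simp only [hcast, PySem.Int.floordiv_natCast, beq_iff_eq, Nat.cast_inj]
      have hklt : k < j * F := by omega
      have : k / F < j := (Nat.div_lt_iff_lt_mul hF).mpr hklt
      omega
    have hfB : (PySem.List.enumerate B (0 + (A.length : Int))).filter
        (fun p => PySem.Int.floordiv p.1 (F : Int) == (j : Int))
        = PySem.List.enumerate B (0 + (A.length : Int)) := by
      apply List.filter_eq_self.mpr
      intro p hp
      rcases (PySem.List.mem_enumerate_iff B _ p).mp hp with ⟨k, hk, rfl⟩
      have hcast : (0 : Int) + (A.length : Int) + (k : Nat) = ((A.length + k : Nat) : Int) := by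
        push_cast; ring
      simp only [hcast, PySem.Int.floordiv_natCast, beq_iff_eq, Nat.cast_inj]
      have h1 : j * F ≤ A.length + k := by omega
      have h2 : A.length + k < (j + 1) * F := by
        have : k < F := by omega
        have hm : (j + 1) * F = j * F + F := by ring
        omega
      exact Nat.div_eq_of_lt_le h1 h2
    have hfC : (PySem.List.enumerate C (0 + (A.length : Int) + (B.length : Int))).filter
        (fun p => PySem.Int.floordiv p.1 (F : Int) == (j : Int)) = [] := by
      apply List.filter_eq_nil_iff.mpr
      intro p hp
      rcases (PySem.List.mem_enumerate_iff C _ p).mp hp with ⟨k, hk, rfl⟩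
      have hclen : C.length = l.length - j * F - F := by
        rw [hC, List.length_drop, List.length_drop]
      have hBF : B.length = F := by omega
      have hcast : (0 : Int) + (A.length : Int) + (B.length : Int) + (k : Nat)
          = ((A.length + B.length + k : Nat) : Int) := by push_cast; ring
      simp only [hcast, PySem.Int.floordiv_natCast, beq_iff_eq, Nat.cast_inj]
      have hge : (j + 1) * F ≤ A.length + B.length + k := by
        have hm : (j + 1) * F = j * F + F := by ring
        omega
      have : j + 1 ≤ (A.length + B.length + k) / F := (Nat.le_div_iff_mul_le hF).mpr hge
      omega
    rw [hfA, hfB, hfC]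
    simp [PySem.List.map_snd_enumerate]

theorem pv_main (files : List String) (ns : Int) (h : 1 ≤ ns) :
    distribute_files files ns = distribute_files_alt files ns := by
  set N := files.length with hN
  set fps : Int := -(PySem.Int.floordiv (-(N : Int)) ns) with hfps
  obtain ⟨h0, hcov⟩ := pv_ceil_facts N ns h
  set F : Nat := fps.toNat with hFdef
  have hF : (F : Int) = fps := Int.toNat_of_nonneg h0
  have hns : ((ns.toNat : Nat) : Int) = ns := Int.toNat_of_nonneg (by omega)
  have hcovN : N ≤ ns.toNat * F := by
    have : (N : Int) ≤ ((ns.toNat * F : Nat) : Int) := by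
      push_cast
      rw [hF, hns]
      linarith [hcov]
    exact_mod_cast this
  have hFpos : 0 < N → 0 < F := by
    intro hNp
    rcases Nat.eq_zero_or_pos F with h9 | h9
    · rw [h9, Nat.mul_zero] at hcovN; omega
    · exact h9
  have hmem : ∀ p ∈ PySem.List.enumerate files 0,
      PySem.Int.floordiv p.1 fps ∈ PySem.List.pyRange 0 ns 1 := by
    intro p hp
    rcases (PySem.List.mem_enumerate_iff files 0 p).mp hp with ⟨k, hk, rfl⟩
    have hFp : 0 < F := hFpos (by omega)
    have hcast : ((0 : Int) + (k : Nat), files[k]).1 = ((k : Nat) : Int) := by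
      simp
    rw [hcast, ← hF, PySem.Int.floordiv_natCast]
    have hdiv : k / F < ns.toNat := (Nat.div_lt_iff_lt_mul hFp).mpr (by omega)
    rw [PySem.List.mem_pyRange_one]
    constructor
    · exact_mod_cast Int.natCast_nonneg _
    · calc ((k / F : Nat) : Int) < ((ns.toNat : Nat) : Int) := by exact_mod_cast hdiv
        _ = ns := hns
  rw [pv_A_items, pv_B_items files ns hmem, ← hN, ← hfps]
  apply List.map_congr_left
  intro i hi
  rw [PySem.List.mem_pyRange_one] at hi
  set j : Nat := i.toNat with hjdef
  have hij : ((j : Nat) : Int) = i := Int.toNat_of_nonneg hi.1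
  have hslice : PySem.List.slice files (some (i * fps)) (some (min ((i + 1) * fps) (N : Int)))
      = (files.drop (j * F)).take F := by
    have e1 : i * fps = ((j * F : Nat) : Int) := by push_cast; rw [hF, hij]
    have e2 : min ((i + 1) * fps) (N : Int) = ((min ((j + 1) * F) N : Nat) : Int) := by
      push_cast; rw [hF, hij]
    rw [e1, e2, PySem.List.slice_natCast]
    rw [List.take_eq_take_iff]
    have hm : (j + 1) * F = j * F + F := by ring
    rw [List.length_drop]
    omega
  have hchunk : ((PySem.List.enumerate files 0).filter
      (fun p => PySem.Int.floordiv p.1 fps == i)).map (fun p => p.2)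
      = (files.drop (j * F)).take F := by
    rcases Nat.eq_zero_or_pos N with hN0 | hNp
    · have : files = [] := List.length_eq_zero_iff.mp hN0
      subst this
      simp [PySem.List.enumerate]
    · have hFp : 0 < F := hFpos hNp
      rw [← hij, ← hF]
      exact pv_chunk_eq files F j hFp
  rw [hslice, hchunk]

-- ===== VERDICT (by name: the statement is the Claim_ definition above) =====
theorem distribute_files_spec : Claim_equal_distribute_files := by
  intro files num_servers _ hpre
  exact pv_main files num_servers hpre
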